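-- pv_equiv track=rewrite | github.com/myylogic/cevahir-ai | cognitive_management/v2/utils/selectors.py | _token_bag
-- ===== SOURCE A (Python) =====
-- def _token_bag(text: str) -> set:
--     """
--     Çok basit bir token torbası (harf/rakam+altçizgi). 2+ uzunluk.
--     """
--     out = []
--     cur = []
--     for ch in (text or "").lower():
--         if ch.isalnum() or ch in ("_", "-"):
--             cur.append(ch)
--         else:
--             if len(cur) >= 2:
--                 out.append("".join(cur))
--             cur = []
--     if len(cur) >= 2:
--         out.append("".join(cur))
--     return set(out)
-- ===== SOURCE B (Python) =====
-- def _token_bag(text: str) -> set: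
--     """Span-based re-implementation: scan maximal token runs with two indices,
--     adding each run of length >= 2 straight into the result set (no cur buffer,
--     no post-loop flush)."""
--     s = (text or "").lower()
--
--     def is_tok(ch):
--         return ch.isalnum() or ch in ("_", "-")
--
--     out = set()
--     i, n = 0, len(s)
--     while i < n:
--         if is_tok(s[i]):
--             j = i
--             while j < n and is_tok(s[j]):
--                 j += 1
--             if j - i >= 2:
--                 out.add(s[i:j])
--             i = j
--         else:
--             i += 1
--     return out
-- ===== Notes on version B (the rewrite author's own statement) =====
-- stated objective: idiomatic
-- what changed: Replaces the character-by-character fold that maintains a cur buffer and a post-loop flush with a span scan that jumps over each maximal token run at once and adds it directly to the result set.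
import Mathlib
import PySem

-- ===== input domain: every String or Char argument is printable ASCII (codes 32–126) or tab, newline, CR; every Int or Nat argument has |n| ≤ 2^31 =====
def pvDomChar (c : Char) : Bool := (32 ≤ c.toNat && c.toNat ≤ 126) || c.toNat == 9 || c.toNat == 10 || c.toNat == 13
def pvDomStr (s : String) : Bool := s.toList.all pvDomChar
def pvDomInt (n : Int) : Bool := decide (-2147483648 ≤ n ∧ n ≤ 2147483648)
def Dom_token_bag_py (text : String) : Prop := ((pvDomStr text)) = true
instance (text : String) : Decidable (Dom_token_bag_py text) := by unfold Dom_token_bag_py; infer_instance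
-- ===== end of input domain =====

-- B replaces A's cur-buffer fold + post-loop flush with a span scan over maximal token runs (idiomatic, same cost).

-- shared character predicate: ch.isalnum() or ch in ("_", "-")
def tokPred (c : Char) : Bool := PySem.Chars.isalnum c || c == '_' || c == '-'

-- ===== PORT A =====
-- one fold step of A's for-loop, state = (out, cur)
def tokStepA (s : List String × List Char) (ch : Char) : List String × List Char :=
  if tokPred ch then (s.1, s.2 ++ [ch])
  else if 2 ≤ s.2.length then (s.1 ++ [String.ofList s.2], []) else (s.1, [])

-- the end-of-loop flush of A's cur buffer
def tokFlush (st : List String × List Char) : List String :=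
  if 2 ≤ st.2.length then st.1 ++ [String.ofList st.2] else st.1

def token_bag_py (text : String) : List String :=
  PySem.Set.ofList (tokFlush ((PySem.Chars.lower text.toList).foldl tokStepA ([], [])))

-- ===== PORT B =====
-- span scan: take the maximal run of token chars, keep it if length >= 2, continue after it
def tokRuns : List Char → List String
  | [] => []
  | c :: cs =>
    if tokPred c then
      let run := (c :: cs).takeWhile tokPred
      let rest := (c :: cs).dropWhile tokPred
      (if 2 ≤ run.length then [String.ofList run] else []) ++ tokRuns rest
    else tokRuns cs
  termination_by l => l.length
  decreasing_by
    · simp_all [List.dropWhile]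
      exact List.length_dropWhile_le _ _
    · simp

def token_bag_py_alt (text : String) : List String :=
  PySem.Set.ofList (tokRuns (PySem.Chars.lower text.toList))

-- ===== PRECONDITION & SPEC =====
def Spec_token_bag_py (text : String) (out : List String) : Prop := out = token_bag_py_alt text
instance (text : String) (out : List String) : Decidable (Spec_token_bag_py text out) := by unfold Spec_token_bag_py; infer_instance

-- ===== CLAIM (what is proved, stated in full; the proofs are below) =====
def Claim_equal_token_bag_py : Prop := ∀ (text : String), Dom_token_bag_py text → Spec_token_bag_py text (token_bag_py text)

-- ===== LEMMAS AND PROOFS =====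

lemma tokRuns_cons_neg {ch : Char} (hch : tokPred ch = false) (rest : List Char) :
    tokRuns (ch :: rest) = tokRuns rest := by
  rw [tokRuns]; simp [hch]

lemma takeWhile_all_append :
    ∀ (cur : List Char), (∀ c ∈ cur, tokPred c = true) →
    ∀ (l : List Char), (cur ++ l).takeWhile tokPred = cur ++ l.takeWhile tokPred := by
  intro cur
  induction cur with
  | nil => simp
  | cons c cs ih =>
    intro h l
    simp [h c (by simp), ih (fun x hx => h x (by simp [hx])) l]

lemma dropWhile_all_append :
    ∀ (cur : List Char), (∀ c ∈ cur, tokPred c = true) →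
    ∀ (l : List Char), (cur ++ l).dropWhile tokPred = l.dropWhile tokPred := by
  intro cur
  induction cur with
  | nil => simp
  | cons c cs ih =>
    intro h l
    simp only [List.cons_append, List.dropWhile_cons, h c (by simp)]
    exact ih (fun x hx => h x (by simp [hx])) l

-- tokRuns of an all-token prefix followed by a non-token char
lemma tokRuns_pred_append (cur : List Char) (h : ∀ c ∈ cur, tokPred c = true)
    (ch : Char) (hch : tokPred ch = false) (rest : List Char) :
    tokRuns (cur ++ ch :: rest) =
      (if 2 ≤ cur.length then [String.ofList cur] else []) ++ tokRuns rest := by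
  cases cur with
  | nil => simp [tokRuns_cons_neg hch]
  | cons c cs =>
    have hc : tokPred c = true := h c (by simp)
    rw [List.cons_append, tokRuns]
    simp only [hc, if_true]
    rw [show (c :: (cs ++ ch :: rest)) = (c :: cs) ++ ch :: rest by simp,
        takeWhile_all_append (c :: cs) h, dropWhile_all_append (c :: cs) h,
        List.takeWhile_cons_of_neg (by simp [hch]), List.dropWhile_cons_of_neg (by simp [hch]),
        tokRuns_cons_neg hch]
    simp

-- tokRuns of an all-token list
lemma tokRuns_all_pred (cur : List Char) (h : ∀ c ∈ cur, tokPred c = true) :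
    tokRuns cur = if 2 ≤ cur.length then [String.ofList cur] else [] := by
  cases cur with
  | nil => simp [tokRuns]
  | cons c cs =>
    have hc : tokPred c = true := h c (by simp)
    rw [tokRuns]
    simp only [hc, if_true]
    rw [List.takeWhile_eq_self_iff.mpr h, List.dropWhile_eq_nil_iff.mpr h]
    simp [tokRuns]

-- the loop invariant: A's fold with buffer cur, once flushed, produces out ++ tokRuns (cur ++ cs)
lemma foldl_tokStepA (cs : List Char) :
    ∀ (out : List String) (cur : List Char), (∀ c ∈ cur, tokPred c = true) →
    tokFlush (cs.foldl tokStepA (out, cur)) = out ++ tokRuns (cur ++ cs) := by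
  induction cs with
  | nil =>
    intro out cur h
    simp only [List.foldl_nil, List.append_nil, tokFlush]
    rw [tokRuns_all_pred cur h]
    split <;> simp
  | cons ch cs ih =>
    intro out cur h
    by_cases hch : tokPred ch = true
    · have : tokStepA (out, cur) ch = (out, cur ++ [ch]) := by
        simp [tokStepA, hch]
      rw [List.foldl_cons, this,
          ih out (cur ++ [ch]) (by intro c hc; rcases List.mem_append.mp hc with h1 | h1
                                   · exact h c h1
                                   · simp at h1; subst h1; exact hch)]
      simp
    · have hch' : tokPred ch = false := by simpa using hch
      have : tokStepA (out, cur) ch =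
          ((if 2 ≤ cur.length then out ++ [String.ofList cur] else out), []) := by
        simp only [tokStepA, hch', Bool.false_eq_true, if_false]
        split <;> simp
      rw [List.foldl_cons, this, ih _ [] (by simp)]
      rw [tokRuns_pred_append cur h ch hch' cs]
      split <;> simp

-- ===== VERDICT (by name: the statement is the Claim_ definition above) =====
theorem token_bag_py_spec : Claim_equal_token_bag_py := by
  intro text _
  unfold Spec_token_bag_py token_bag_py token_bag_py_alt
  have := foldl_tokStepA (PySem.Chars.lower text.toList) [] [] (by simp)
  simp only [List.nil_append] at this
  rw [this]
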